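-- pv_equiv track=rewrite | github.com/SaladBreaker/Truth-Table | LCS.py | create_values
-- ===== SOURCE A (Python) =====
-- def create_values(x):
--     values = list()
--     i=0
--     max=list(bin(x))[2:] #I use this to know the length of the list
--                          #becouse for example 2 in banary is 10
--                          #but I need to fill the rest of the spaces with 0
--                          #so the list will look [0,0,0] (for 3 atoms)
--     while i<x:
--         b=bin(i)
--         b=b[2:]
--         b=list(map(int,b))  #convert str to int
--         b=b[::-1]
--         while len(b) < len(max)-1: #fills with 0 the rest of the space
--             b.append(0)
--         values.append(b)
--         i+=1
--     return values
-- ===== SOURCE B (Python) =====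
-- def create_values(x):
--     if x <= 0:
--         return []
--     width = x.bit_length() - 1
--     return [[(i >> j) & 1 for j in range(max(i.bit_length(), 1, width))]
--             for i in range(x)]
-- ===== Notes on version B (the rewrite author's own statement) =====
-- stated objective: idiomatic
-- what changed: Rows are generated by arithmetic bit extraction (shift-and-mask) over the exact required width (the larger of i's bit length and the shared pad width, computed once from x's bit length), replacing A's per-row bin()/slice/map(int)/reverse string chain and its inner zero-padding while-loop.
import Mathlib
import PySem

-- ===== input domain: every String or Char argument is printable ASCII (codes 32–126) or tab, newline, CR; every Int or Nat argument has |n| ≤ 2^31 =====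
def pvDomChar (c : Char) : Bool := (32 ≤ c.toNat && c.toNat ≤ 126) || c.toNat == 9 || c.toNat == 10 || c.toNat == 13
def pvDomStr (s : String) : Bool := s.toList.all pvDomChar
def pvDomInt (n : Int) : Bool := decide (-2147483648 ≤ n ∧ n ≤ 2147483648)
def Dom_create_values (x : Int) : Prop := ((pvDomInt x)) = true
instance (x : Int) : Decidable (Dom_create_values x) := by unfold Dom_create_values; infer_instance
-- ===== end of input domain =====

-- B builds each row by arithmetic bit extraction with the pad width computed once,
-- instead of A's per-row bin()/slice/map(int)/reverse string chain and inner padding loop (objective: idiomatic).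

-- ===== PORT A =====
-- digits of bin(n) after the "0b" prefix, for n > 0 (MSB first); pvBinAux 0 = []
def pvBinAux : Nat → List Int
  | 0 => []
  | n+1 => pvBinAux ((n+1)/2) ++ [(((n+1) % 2 : Nat) : Int)]
decreasing_by exact Nat.div_lt_self (Nat.succ_pos n) (by norm_num)

-- list(bin(n))[2:] as ints, n ≥ 0 (bin(0) = "0b0")
def pvBin (n : Nat) : List Int := if n = 0 then [0] else pvBinAux n

-- inner while: fills b with 0 until len(b) ≥ target
def pvPad (b : List Int) (target : Nat) : List Int :=
  if b.length < target then pvPad (b ++ [0]) target else b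
termination_by target - b.length
decreasing_by simp; omega

def create_values (x : Int) : List (List Int) :=
  -- max = list(bin(x))[2:]; for negative x the '-' shifts the slice so 'b' is kept: one extra element
  let mx : List Int := if 0 ≤ x then pvBin x.toNat else (0 : Int) :: pvBin (-x).toNat
  -- while i < x: build row from bin(i), reverse, pad, append
  (List.range x.toNat).foldl
    (fun values i => values ++ [pvPad ((pvBin i).reverse) (mx.length - 1)]) []

-- ===== PORT B =====
-- i.bit_length()
def pvBitLen : Nat → Nat
  | 0 => 0
  | n+1 => pvBitLen ((n+1)/2) + 1
decreasing_by exact Nat.div_lt_self (Nat.succ_pos n) (by norm_num)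

def create_values_alt (x : Int) : List (List Int) :=
  if x ≤ 0 then []
  else
    let width := pvBitLen x.toNat - 1
    (List.range x.toNat).map (fun i =>
      (List.range (max (max (pvBitLen i) 1) width)).map (fun j => (((i >>> j) % 2 : Nat) : Int)))

-- ===== PRECONDITION & SPEC =====
def Spec_create_values (x : Int) (out : List (List Int)) : Prop := out = create_values_alt x
instance (x : Int) (out : List (List Int)) : Decidable (Spec_create_values x out) := by unfold Spec_create_values; infer_instance

-- ===== CLAIM (what is proved, stated in full; the proofs are below) =====
def Claim_equal_create_values : Prop := ∀ (x : Int), Dom_create_values x → Spec_create_values x (create_values x)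

-- ===== LEMMAS AND PROOFS =====

theorem pvBitLen_pos (n : Nat) (h : 0 < n) : 0 < pvBitLen n := by
  cases n with
  | zero => omega
  | succ m => rw [pvBitLen]; omega

theorem pvBitLen_lt (n : Nat) : n < 2 ^ pvBitLen n := by
  induction n using Nat.strong_induction_on with
  | _ n ih =>
    cases n with
    | zero => simp [pvBitLen]
    | succ m =>
      rw [pvBitLen, pow_succ]
      have h1 : (m+1)/2 < m+1 := Nat.div_lt_self (Nat.succ_pos m) (by norm_num)
      have h2 := ih ((m+1)/2) h1
      omega

theorem shiftRight_succ_div (n j : Nat) : n >>> (j+1) = (n/2) >>> j := by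
  rw [Nat.shiftRight_eq_div_pow, Nat.shiftRight_eq_div_pow, Nat.div_div_eq_div_mul,
    Nat.pow_succ, Nat.mul_comm]

theorem pvShift_eq_zero (i j : Nat) (h : pvBitLen i ≤ j) : i >>> j = 0 := by
  rw [Nat.shiftRight_eq_div_pow]
  exact Nat.div_eq_of_lt (lt_of_lt_of_le (pvBitLen_lt i) (Nat.pow_le_pow_right (by norm_num) h))

theorem pvBinAux_reverse (n : Nat) :
    (pvBinAux n).reverse = (List.range (pvBitLen n)).map (fun j => (((n >>> j) % 2 : Nat) : Int)) := by
  induction n using Nat.strong_induction_on with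
  | _ n ih =>
    cases n with
    | zero => simp [pvBinAux, pvBitLen]
    | succ m =>
      have h1 : (m+1)/2 < m+1 := Nat.div_lt_self (Nat.succ_pos m) (by norm_num)
      rw [pvBinAux, pvBitLen, List.reverse_append, List.reverse_singleton, List.singleton_append,
          ih ((m+1)/2) h1, List.range_succ_eq_map, List.map_cons, List.map_map]
      congr 1
      apply List.map_congr_left
      intro j _
      simp only [Function.comp_apply, Nat.succ_eq_add_one, shiftRight_succ_div]

theorem pvBinAux_length (n : Nat) : (pvBinAux n).length = pvBitLen n := by
  have := congrArg List.length (pvBinAux_reverse n)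
  simpa using this

theorem pvBin_reverse (n : Nat) :
    (pvBin n).reverse = (List.range (max (pvBitLen n) 1)).map (fun j => (((n >>> j) % 2 : Nat) : Int)) := by
  by_cases h : n = 0
  · subst h; simp [pvBin, pvBitLen, List.range_succ]
  · have hp : 0 < pvBitLen n := pvBitLen_pos n (Nat.pos_of_ne_zero h)
    rw [pvBin, if_neg h, pvBinAux_reverse, Nat.max_eq_left hp]

theorem pvBin_length (n : Nat) : (pvBin n).length = max (pvBitLen n) 1 := by
  by_cases h : n = 0
  · subst h; simp [pvBin, pvBitLen]
  · have hp : 0 < pvBitLen n := pvBitLen_pos n (Nat.pos_of_ne_zero h)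
    rw [pvBin, if_neg h, pvBinAux_length, Nat.max_eq_left hp]

theorem pvPad_eq_aux (k : Nat) : ∀ (b : List Int) (t : Nat), t - b.length ≤ k →
    pvPad b t = b ++ List.replicate (t - b.length) 0 := by
  induction k with
  | zero =>
    intro b t h
    have h2 : ¬ b.length < t := by omega
    rw [pvPad, if_neg h2]
    have h3 : t - b.length = 0 := by omega
    simp [h3]
  | succ k ih =>
    intro b t h
    by_cases h2 : b.length < t
    · rw [pvPad, if_pos h2, ih (b ++ [0]) t (by simp; omega)]
      simp only [List.length_append, List.length_singleton, List.append_assoc,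
        List.singleton_append]
      congr 1
      have : t - b.length = (t - (b.length + 1)) + 1 := by omega
      rw [this, List.replicate_succ]
    · rw [pvPad, if_neg h2]
      have h3 : t - b.length = 0 := by omega
      simp [h3]

theorem pvPad_eq (b : List Int) (t : Nat) : pvPad b t = b ++ List.replicate (t - b.length) 0 :=
  pvPad_eq_aux (t - b.length) b t le_rfl

theorem range'_map_zero (g : Nat → Int) (a k : Nat) (h : ∀ j, a ≤ j → g j = 0) :
    (List.range' a k).map g = List.replicate k 0 := by
  induction k generalizing a with
  | zero => simp
  | succ k ih =>
    rw [List.range'_succ, List.map_cons, List.replicate_succ, h a le_rfl]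
    rw [ih (a+1) (fun j hj => h j (by omega))]

theorem row_eq (i w : Nat) :
    pvPad ((pvBin i).reverse) w
      = (List.range (max (max (pvBitLen i) 1) w)).map (fun j => (((i >>> j) % 2 : Nat) : Int)) := by
  set g : Nat → Int := fun j => (((i >>> j) % 2 : Nat) : Int) with hg
  set m := max (pvBitLen i) 1 with hm
  set n := max m w with hn
  have hlen : (pvBin i).reverse.length = m := by rw [List.length_reverse, pvBin_length]
  have hmn : m ≤ n := le_max_left _ _
  have hzero : ∀ j, m ≤ j → g j = 0 := by
    intro j hj
    have h0 : i >>> j = 0 := pvShift_eq_zero i j (le_trans (le_max_left _ _) hj)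
    show (((i >>> j) % 2 : Nat) : Int) = 0
    rw [h0]
    simp
  rw [pvPad_eq, hlen, pvBin_reverse, ← hg, ← hm]
  have hsplit : List.range n = List.range' 0 m ++ List.range' m (n - m) := by
    rw [List.range_eq_range', show n = m + (n - m) from by omega, ← List.range'_append]
    norm_num
  rw [hsplit, List.map_append, ← List.range_eq_range', range'_map_zero g m (n - m) hzero]
  have hcnt : w - m = n - m := by
    rw [hn]
    rcases Nat.le_total w m with h | h
    · rw [Nat.max_eq_left h]; omega
    · rw [Nat.max_eq_right h]
  rw [hcnt]

theorem foldl_append_singleton' {α β : Type} (h : α → β) (l : List α) (acc : List β) :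
    l.foldl (fun vs i => vs ++ [h i]) acc = acc ++ l.map h := by
  induction l generalizing acc with
  | nil => simp
  | cons a t ih => simp [ih]

-- ===== VERDICT (by name: the statement is the Claim_ definition above) =====
theorem create_values_spec : Claim_equal_create_values := by
  intro x _
  unfold Spec_create_values create_values create_values_alt
  by_cases hx : x ≤ 0
  · have : x.toNat = 0 := Int.toNat_of_nonpos hx
    simp [this, hx]
  · rw [if_neg hx]
    have hx0 : 0 ≤ x := le_of_not_ge (by omega)
    have hxpos : 0 < x.toNat := by omega
    rw [if_pos hx0, foldl_append_singleton', List.nil_append]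
    have hlen : (pvBin x.toNat).length - 1 = pvBitLen x.toNat - 1 := by
      rw [pvBin_length, Nat.max_eq_left (pvBitLen_pos _ hxpos)]
    rw [hlen]
    apply List.map_congr_left
    intro i _
    exact row_eq i (pvBitLen x.toNat - 1)
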